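-- pv_equiv track=rewrite | github.com/danmengo/Homework-Helper | public/jasonshwproj/jason.py | list_numbers
-- ===== SOURCE A (Python) =====
-- def list_numbers(formula) -> list:
--     numbers = []
--     current_num = ""
--     for each in formula:
--         if each.isalpha():
--             if current_num:
--                 numbers.append(current_num)
--             numbers.append(each)
--             current_num = ""
--         elif each.isdigit():
--             current_num += each
--
--     if current_num:
--         numbers.append(current_num)
--     return numbers
-- ===== SOURCE B (Python) =====
-- def list_numbers(formula) -> list:
--     # Pass 1: drop every separator (anything that is neither a letter nor a digit);
--     # this is what makes digit runs merge across separators, as in the original.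
--     kept = [c for c in formula if c.isalpha() or c.isdigit()]
--     # Pass 2: group the filtered characters: each letter is its own token,
--     # each maximal digit run is one token.
--     out = []
--     i = 0
--     n = len(kept)
--     while i < n:
--         if kept[i].isalpha():
--             out.append(kept[i])
--             i += 1
--         else:
--             j = i
--             while j < n and kept[j].isdigit():
--                 j += 1
--             out.append(''.join(kept[i:j]))
--             i = j
--     return out
-- ===== Notes on version B (the rewrite author's own statement) =====
-- stated objective: alternative
-- what changed: Replaces A's single accumulator loop (building current_num and flushing it on letters/at the end) by a two-pass decomposition: first filter out separator characters, then group the filtered sequence, emitting each letter alone and each maximal digit run joined as one token.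
import Mathlib
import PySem

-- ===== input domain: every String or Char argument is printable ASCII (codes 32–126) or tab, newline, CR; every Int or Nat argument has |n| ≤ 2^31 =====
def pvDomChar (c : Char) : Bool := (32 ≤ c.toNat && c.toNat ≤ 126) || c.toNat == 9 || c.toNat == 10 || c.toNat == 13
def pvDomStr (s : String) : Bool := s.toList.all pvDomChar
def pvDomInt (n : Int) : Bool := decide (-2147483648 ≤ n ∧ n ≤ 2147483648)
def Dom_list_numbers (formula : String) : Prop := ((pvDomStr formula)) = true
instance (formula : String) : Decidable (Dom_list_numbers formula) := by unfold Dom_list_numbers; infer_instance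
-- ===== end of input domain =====

-- B replaces A's single accumulator loop by a two-pass decomposition (filter out
-- separators, then group letters singly and maximal digit runs); same cost, alternative structure.


-- ===== PORT A =====
-- loop body of A's for-loop (state = (numbers, current_num))
def pvStep (st : List String × List Char) (each : Char) : List String × List Char :=
  if PySem.Chars.isalpha each then
    ((if st.2 ≠ [] then st.1 ++ [String.mk st.2] else st.1) ++ [String.mk [each]], [])
  else if PySem.Chars.isdigit each then
    (st.1, st.2 ++ [each])
  else st

-- A's trailing 'if current_num: numbers.append(current_num)'
def pvFinish (st : List String × List Char) : List String :=
  if st.2 ≠ [] then st.1 ++ [String.mk st.2] else st.1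

def list_numbers (formula : String) : List String :=
  pvFinish (formula.toList.foldl pvStep (([] : List String), ([] : List Char)))

-- ===== PORT B =====
-- c.isalpha() or c.isdigit()
def pvKeep (c : Char) : Bool := PySem.Chars.isalpha c || PySem.Chars.isdigit c

-- B's index-walking grouping pass: a letter is its own token, a maximal digit run is one token
def pvGroup : List Char → List String
  | [] => []
  | c :: rest =>
    if PySem.Chars.isalpha c then
      String.mk [c] :: pvGroup rest
    else
      String.mk (c :: rest.takeWhile PySem.Chars.isdigit) ::
        pvGroup (rest.dropWhile PySem.Chars.isdigit)
termination_by cs => cs.length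
decreasing_by
  · simp
  · have := List.length_dropWhile_le PySem.Chars.isdigit rest
    simp; omega

def list_numbers_alt (formula : String) : List String :=
  pvGroup (formula.toList.filter pvKeep)

-- ===== PRECONDITION & SPEC =====
def Spec_list_numbers (formula : String) (out : List String) : Prop := out = list_numbers_alt formula
instance (formula : String) (out : List String) : Decidable (Spec_list_numbers formula out) := by unfold Spec_list_numbers; infer_instance

-- ===== CLAIM (what is proved, stated in full; the proofs are below) =====
def Claim_equal_list_numbers : Prop := ∀ (formula : String), Dom_list_numbers formula → Spec_list_numbers formula (list_numbers formula)

-- ===== LEMMAS AND PROOFS =====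

theorem pv_digit_not_alpha (c : Char) (h : PySem.Chars.isdigit c = true) :
    PySem.Chars.isalpha c = false := by
  simp only [PySem.Chars.isdigit, PySem.Chars.isalpha, PySem.Chars.isupper, PySem.Chars.islower,
    Bool.and_eq_true, decide_eq_true_eq, Bool.or_eq_false_iff, Bool.and_eq_false_imp,
    decide_eq_false_iff_not, not_le, Char.le_def, UInt32.le_iff_toNat_le] at h ⊢
  have h0 : '0'.val.toNat = 48 := rfl
  have h9 : '9'.val.toNat = 57 := rfl
  have hA : 'A'.val.toNat = 65 := rfl
  have hZ : 'Z'.val.toNat = 90 := rfl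
  have ha : 'a'.val.toNat = 97 := rfl
  have hz : 'z'.val.toNat = 122 := rfl
  omega

theorem pv_alpha_not_digit (c : Char) (h : PySem.Chars.isalpha c = true) :
    PySem.Chars.isdigit c = false := by
  by_cases hd : PySem.Chars.isdigit c = true
  · rw [pv_digit_not_alpha c hd] at h; exact absurd h (by simp)
  · simpa using hd

-- splitting takeWhile/dropWhile at the end of an all-digit block
theorem pv_tw_dw (ds t : List Char) (h : ∀ c ∈ ds, PySem.Chars.isdigit c = true)
    (ht : ∀ c, t.head? = some c → PySem.Chars.isdigit c = false) :
    (ds ++ t).takeWhile PySem.Chars.isdigit = ds ∧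
    (ds ++ t).dropWhile PySem.Chars.isdigit = t := by
  induction ds with
  | nil =>
    cases t with
    | nil => simp
    | cons c t' =>
      have := ht c (by simp)
      simp [this]
  | cons d ds' ih =>
    have hd := h d (by simp)
    have := ih (fun c hc => h c (by simp [hc]))
    simp [hd, this.1, this.2]

-- pvGroup on an all-digit nonempty block followed by t (empty or starting with a non-digit)
theorem pv_group_digits (d : Char) (ds t : List Char)
    (h : ∀ c ∈ d :: ds, PySem.Chars.isdigit c = true)
    (ht : ∀ c, t.head? = some c → PySem.Chars.isdigit c = false) :
    pvGroup (d :: ds ++ t) = String.mk (d :: ds) :: pvGroup t := by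
  have hd := h d (by simp)
  have htd := pv_tw_dw ds t (fun c hc => h c (by simp [hc])) ht
  simp [pvGroup, pv_digit_not_alpha d hd, htd.1, htd.2]

-- the loop invariant tying A's accumulator run to B's filter+group
theorem pv_key (cs : List Char) :
    ∀ (ns : List String) (cur : List Char), (∀ c ∈ cur, PySem.Chars.isdigit c = true) →
    pvFinish (cs.foldl pvStep (ns, cur)) = ns ++ pvGroup (cur ++ cs.filter pvKeep) := by
  induction cs with
  | nil =>
    intro ns cur hcur
    cases cur with
    | nil => simp [pvFinish, pvGroup]
    | cons d ds =>
      have := pv_group_digits d ds [] hcur (by simp)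
      simp only [List.filter_nil, List.append_nil] at *
      simp [pvFinish, this, pvGroup]
  | cons c cs' ih =>
    intro ns cur hcur
    by_cases ha : PySem.Chars.isalpha c = true
    · have hnd := pv_alpha_not_digit c ha
      have hstep : pvStep (ns, cur) c =
          ((if cur ≠ [] then ns ++ [String.mk cur] else ns) ++ [String.mk [c]], []) := by
        simp [pvStep, ha]
      rw [List.foldl_cons, hstep, ih _ [] (by simp)]
      cases cur with
      | nil => simp [pvKeep, ha, pvGroup, hnd]
      | cons d ds =>
        have hgrp := pv_group_digits d ds (c :: cs'.filter pvKeep) hcur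
          (by intro x hx; simp at hx; rw [← hx]; exact hnd)
        have h2 : pvGroup (c :: List.filter pvKeep cs') =
            String.mk [c] :: pvGroup (List.filter pvKeep cs') := by
          simp [pvGroup, ha]
        simp only [pvKeep, ha, Bool.true_or, if_pos, List.nil_append, List.filter_cons]
        rw [hgrp, h2]
        simp
    · by_cases hd : PySem.Chars.isdigit c = true
      · have hstep : pvStep (ns, cur) c = (ns, cur ++ [c]) := by
          simp [pvStep, ha, hd]
        rw [List.foldl_cons, hstep,
          ih _ (cur ++ [c]) (by intro x hx; rcases List.mem_append.1 hx with h | h;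
                                exact hcur x h; simp at h; rw [h]; exact hd)]
        simp [pvKeep, ha, hd]
      · have hstep : pvStep (ns, cur) c = (ns, cur) := by
          simp [pvStep, ha, hd]
        rw [List.foldl_cons, hstep, ih _ cur hcur]
        simp [pvKeep, ha, hd]

-- ===== VERDICT (by name: the statement is the Claim_ definition above) =====
theorem list_numbers_spec : Claim_equal_list_numbers := by
  intro formula _
  unfold Spec_list_numbers list_numbers list_numbers_alt
  simpa using pv_key formula.toList [] [] (by simp)
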